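-- pv_equiv track=rewrite | github.com/MeritEnding/algorithm | 프로그래머스/0/120843. 공 던지기/공 던지기.py | solution
-- ===== SOURCE A (Python) =====
-- def solution(numbers, k):
--     answer = 0
--     arr=[]
--     length=len(numbers)
--     for i in range(0,k*2,2):
--         arr.append(numbers[i%length])
--
--     answer = arr[k-1]
--     return answer
-- ===== SOURCE B (Python) =====
-- def solution(numbers, k):
--     return numbers[(2 * (k - 1)) % len(numbers)]
-- ===== Notes on version B (the rewrite author's own statement) =====
-- stated objective: faster
-- what changed: Replaced the O(k) loop that builds the whole throw sequence with the closed-form index numbers[(2*(k-1)) % len(numbers)].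
import Mathlib
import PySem

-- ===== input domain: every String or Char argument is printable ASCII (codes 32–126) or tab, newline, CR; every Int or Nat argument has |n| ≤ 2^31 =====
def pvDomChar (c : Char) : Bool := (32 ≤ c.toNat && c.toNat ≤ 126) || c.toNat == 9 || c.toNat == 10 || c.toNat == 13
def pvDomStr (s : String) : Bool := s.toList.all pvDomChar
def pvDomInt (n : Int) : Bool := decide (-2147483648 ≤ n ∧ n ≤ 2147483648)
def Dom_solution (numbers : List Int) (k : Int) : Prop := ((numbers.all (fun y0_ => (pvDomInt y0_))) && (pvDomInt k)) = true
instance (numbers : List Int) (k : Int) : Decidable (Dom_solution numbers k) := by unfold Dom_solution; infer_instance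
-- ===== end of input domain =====

-- B replaces A's O(k) loop by the closed-form index numbers[(2*(k-1)) % len(numbers)].
-- ===== PORT A =====
def solution (numbers : List Int) (k : Int) : Int :=
  let length : Int := numbers.length
  -- Python's list with O(1) append is ported as Array with push
  let arr : Array Int :=
    (PySem.List.pyRange 0 (k * 2) 2).foldl
      (fun arr i => arr.push (PySem.List.pyGetD numbers (PySem.Int.mod i length) 0)) #[]
  PySem.List.pyGetD arr.toList (k - 1) 0

-- ===== PORT B =====
def solution_alt (numbers : List Int) (k : Int) : Int :=
  PySem.List.pyGetD numbers (PySem.Int.mod (2 * (k - 1)) (numbers.length : Int)) 0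

-- ===== PRECONDITION & SPEC =====
-- Pre_ excludes exactly the inputs where A raises: numbers = [] (ZeroDivisionError on i % 0,
-- or IndexError for k ≤ 0) and k ≤ 0 (arr[k-1] is an IndexError since arr has max(k,0) elements).
def Pre_solution (numbers : List Int) (k : Int) : Prop := numbers ≠ [] ∧ 1 ≤ k
instance (numbers : List Int) (k : Int) : Decidable (Pre_solution numbers k) := by
  unfold Pre_solution; infer_instance
def pvWitness_solution : List Int × Int := ([3, 7, 2], 5)

def Spec_solution (numbers : List Int) (k : Int) (out : Int) : Prop := out = solution_alt numbers k
instance (numbers : List Int) (k : Int) (out : Int) : Decidable (Spec_solution numbers k out) := by unfold Spec_solution; infer_instance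

-- ===== CLAIM (what is proved, stated in full; the proofs are below) =====
def Claim_equal_solution : Prop := ∀ (numbers : List Int) (k : Int), Dom_solution numbers k → Pre_solution numbers k → Spec_solution numbers k (solution numbers k)

-- ===== LEMMAS AND PROOFS =====
theorem pv_foldl_push_toList {α : Type} (f : Int → α) (l : List Int) (acc : Array α) :
    (l.foldl (fun a x => a.push (f x)) acc).toList = acc.toList ++ l.map f := by
  induction l generalizing acc with
  | nil => simp
  | cons x xs ih => simp [List.foldl_cons]

theorem pv_getD_map_range {g : Nat → Int} {n : Nat} {i : Int} {d : Int}
    (h0 : 0 ≤ i) (h1 : i < (n : Int)) :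
    PySem.List.pyGetD ((List.range n).map g) i d = g i.toNat := by
  rw [PySem.List.pyGetD_eq_getElem _ d h0 (by simpa using h1)]
  simp


-- ===== VERDICT (by name: the statement is the Claim_ definition above) =====
theorem solution_spec : Claim_equal_solution := by
  intro numbers k _ hpre
  obtain ⟨hne, hk⟩ := hpre
  unfold Spec_solution solution solution_alt
  simp only
  rw [pv_foldl_push_toList, Array.toList_empty, List.nil_append,
      PySem.List.pyRange_of_pos 0 (k * 2) (by norm_num)]
  have hn : (if (0:Int) < k * 2 then ((k * 2 - 0 + 2 - 1) / 2).toNat else 0) = k.toNat := by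
    rw [if_pos (by omega)]; omega
  rw [hn, List.map_map]
  rw [pv_getD_map_range (by omega) (by omega)]
  simp only [Function.comp]
  have h2 : (0 : Int) + 2 * ((k - 1).toNat : Int) = 2 * (k - 1) := by omega
  rw [h2]
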